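-- pv_equiv track=rewrite | github.com/vhunany/comp110ideas | units-f24/unit02/todo_list.py | count_tasks
-- ===== SOURCE A (Python) =====
-- def count_tasks(todo_list):
--     done_count = 0
--     not_done_count = 0
--
--     # Iterate through dictionary keys directly
--     for task in todo_list:
--         if todo_list[task] == 'done':
--             done_count += 1
--         elif todo_list[task] == 'not done':
--             not_done_count += 1
--
--     return {'done': done_count, 'not done': not_done_count}
-- ===== SOURCE B (Python) =====
-- def _go(vals):
--     n = len(vals)
--     if n == 0:
--         return (0, 0)
--     if n == 1:
--         v = vals[0]
--         if v == 'done':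
--             return (1, 0)
--         if v == 'not done':
--             return (0, 1)
--         return (0, 0)
--     m = n // 2
--     dl, nl = _go(vals[:m])
--     dr, nr = _go(vals[m:])
--     return (dl + dr, nl + nr)
--
--
-- def count_tasks(todo_list):
--     d, nd = _go(list(todo_list.values()))
--     return {'done': d, 'not done': nd}
-- ===== Notes on version B (the rewrite author's own statement) =====
-- stated objective: alternative
-- what changed: Replaces A's single linear scan with branching scalar accumulators by a divide-and-conquer recursion over the values: split the list in halves, count each half recursively, and combine the two (done, not done) pairs by addition.
import Mathlib
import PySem

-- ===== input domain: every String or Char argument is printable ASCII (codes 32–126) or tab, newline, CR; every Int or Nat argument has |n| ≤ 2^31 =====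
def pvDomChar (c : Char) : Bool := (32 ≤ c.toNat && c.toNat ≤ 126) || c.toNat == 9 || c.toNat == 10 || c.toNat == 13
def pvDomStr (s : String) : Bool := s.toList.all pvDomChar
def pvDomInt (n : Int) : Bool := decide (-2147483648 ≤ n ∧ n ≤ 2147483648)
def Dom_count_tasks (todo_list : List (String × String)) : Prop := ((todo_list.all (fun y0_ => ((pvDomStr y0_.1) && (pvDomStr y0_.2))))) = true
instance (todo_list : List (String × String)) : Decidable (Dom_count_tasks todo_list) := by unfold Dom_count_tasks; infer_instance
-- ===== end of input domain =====

-- B replaces A's linear branching scan by a divide-and-conquer recursion over the values (alternative decomposition, same cost).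


-- ===== PORT A =====
-- one loop step: look up the current key in the whole dict (first match) and bump the matching counter
def ctStep (full : List (String × String)) (acc : Int × Int) (kv : String × String) : Int × Int :=
  match (full.find? (fun p => p.1 == kv.1)).map Prod.snd with
  | some v => if v == "done" then (acc.1 + 1, acc.2)
              else if v == "not done" then (acc.1, acc.2 + 1)
              else acc
  | none => acc

def count_tasks (todo_list : List (String × String)) : List (String × Int) :=
  let r := todo_list.foldl (ctStep todo_list) (0, 0)
  [("done", r.1), ("not done", r.2)]

-- ===== PORT B =====
-- divide and conquer over the values: halves counted recursively, pairs combined by addition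
def ctGo (vals : List String) : Int × Int :=
  if vals.length = 0 then (0, 0)
  else if vals.length = 1 then
    match vals with
    | v :: _ => if v == "done" then (1, 0) else if v == "not done" then (0, 1) else (0, 0)
    | [] => (0, 0)
  else
    let m := vals.length / 2
    let l := ctGo (vals.take m)
    let r := ctGo (vals.drop m)
    (l.1 + r.1, l.2 + r.2)
termination_by vals.length
decreasing_by
  · simp only [List.length_take]; omega
  · simp only [List.length_drop]; omega

def count_tasks_alt (todo_list : List (String × String)) : List (String × Int) :=
  let r := ctGo (todo_list.map Prod.snd)
  [("done", r.1), ("not done", r.2)]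

-- ===== PRECONDITION & SPEC =====
-- Pre_ requires distinct keys: the argument is a Python dict, which can never hold duplicate
-- keys, so this excludes no input the Python A can receive.
def Pre_count_tasks (todo_list : List (String × String)) : Prop :=
  (todo_list.map Prod.fst).Nodup
instance (todo_list : List (String × String)) : Decidable (Pre_count_tasks todo_list) := by unfold Pre_count_tasks; infer_instance
def pvWitness_count_tasks : (List (String × String)) := [("a", "done"), ("b", "not done"), ("c", "maybe")]

def Spec_count_tasks (todo_list : List (String × String)) (out : List (String × Int)) : Prop := out = count_tasks_alt todo_list
instance (todo_list : List (String × String)) (out : List (String × Int)) : Decidable (Spec_count_tasks todo_list out) := by unfold Spec_count_tasks; infer_instance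

-- ===== CLAIM (what is proved, stated in full; the proofs are below) =====
def Claim_equal_count_tasks : Prop := ∀ (todo_list : List (String × String)), Dom_count_tasks todo_list → Pre_count_tasks todo_list → Spec_count_tasks todo_list (count_tasks todo_list)

-- ===== LEMMAS AND PROOFS =====

-- with distinct keys, the first-match lookup of an element's own key returns that element
theorem find?_self_of_nodup (l : List (String × String)) (kv : String × String)
    (hn : (l.map Prod.fst).Nodup) (hm : kv ∈ l) :
    l.find? (fun p => p.1 == kv.1) = some kv := by
  induction l with
  | nil => cases hm
  | cons hd tl ih =>
    simp only [List.map_cons, List.nodup_cons] at hn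
    rcases List.mem_cons.mp hm with h | h
    · subst h
      simp [List.find?]
    · have hne : hd.1 ≠ kv.1 := fun he => hn.1 (he ▸ List.mem_map_of_mem h)
      simp only [List.find?]
      rw [show (hd.1 == kv.1) = false from beq_eq_false_iff_ne.mpr hne]
      exact ih hn.2 h

-- the fold over a sublist whose elements all look themselves up counts the two values
theorem fold_counts (full : List (String × String)) (l : List (String × String))
    (h : ∀ kv ∈ l, full.find? (fun p => p.1 == kv.1) = some kv) (a b : Int) :
    l.foldl (ctStep full) (a, b) =
      (a + ((l.map Prod.snd).count "done" : Int),
       b + ((l.map Prod.snd).count "not done" : Int)) := by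
  induction l generalizing a b with
  | nil => simp
  | cons hd tl ih =>
    have hhd := h hd (List.mem_cons_self ..)
    simp only [List.foldl_cons, ctStep, hhd, Option.map_some]
    have htl : ∀ kv ∈ tl, full.find? (fun p => p.1 == kv.1) = some kv :=
      fun kv hm => h kv (List.mem_cons_of_mem _ hm)
    by_cases h1 : hd.2 = "done"
    · simp only [h1, BEq.rfl, if_true]
      rw [ih htl]
      simp [h1]
      omega
    · by_cases h2 : hd.2 = "not done"
      · rw [show (hd.2 == "done") = false from beq_eq_false_iff_ne.mpr h1]
        simp only [h2, BEq.rfl, if_true]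
        rw [ih htl]
        simp [h2, show ¬("not done" = "done") from by decide]
        omega
      · rw [show (hd.2 == "done") = false from beq_eq_false_iff_ne.mpr h1,
            show (hd.2 == "not done") = false from beq_eq_false_iff_ne.mpr h2]
        rw [ih htl]
        simp [h1, h2]

-- the divide-and-conquer recursion computes the two counts
theorem ctGo_eq (vals : List String) :
    ctGo vals = ((vals.count "done" : Int), (vals.count "not done" : Int)) := by
  induction vals using ctGo.induct with
  | case1 vals h0 => rw [ctGo.eq_def]; simp [List.length_eq_zero_iff.mp h0]
  | case2 v rest hbeq h0 h1 =>
    have : rest = [] := by simpa using h1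
    subst this
    rw [ctGo.eq_def]; simp_all
  | case3 v rest hd hbeq h0 h1 =>
    have : rest = [] := by simpa using h1
    subst this
    rw [ctGo.eq_def]; simp_all
  | case4 v rest hd hnd h0 h1 =>
    have : rest = [] := by simpa using h1
    subst this
    rw [ctGo.eq_def]; simp_all
  | case5 h0 h1 => simp at h1
  | case6 vals h0 h1 m ih1 ih2 =>
    rw [ctGo.eq_def]
    have hm : m = vals.length / 2 := rfl
    rw [hm] at ih1 ih2
    simp only [if_neg h0, if_neg h1, ih1, ih2]
    have hsplit := List.take_append_drop (vals.length / 2) vals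
    have c1 : (List.take (vals.length / 2) vals).count "done"
        + (List.drop (vals.length / 2) vals).count "done" = vals.count "done" := by
      conv_rhs => rw [← hsplit]
      rw [List.count_append]
    have c2 : (List.take (vals.length / 2) vals).count "not done"
        + (List.drop (vals.length / 2) vals).count "not done" = vals.count "not done" := by
      conv_rhs => rw [← hsplit]
      rw [List.count_append]
    simp only [Prod.mk.injEq]
    refine ⟨?_, ?_⟩ <;> omega

-- ===== VERDICT (by name: the statement is the Claim_ definition above) =====
theorem count_tasks_spec : Claim_equal_count_tasks := by
  intro todo_list _ hpre
  unfold Spec_count_tasks count_tasks count_tasks_alt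
  have h := fold_counts todo_list todo_list
    (fun kv hm => find?_self_of_nodup todo_list kv hpre hm) 0 0
  rw [h, ctGo_eq]
  simp
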